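-- pv_equiv track=rewrite | github.com/varadrz/60-Days-of-Coding-DSA-Real-World-Projects | Day-7-Network-Traffic-Analyzer/day-7.py | peak_traffic_window
-- ===== SOURCE A (Python) =====
-- def peak_traffic_window(traffic, window_size):
--     current_sum = sum(traffic[:window_size])
--     max_sum = current_sum
--     start_index = 0
--
--     for i in range(window_size, len(traffic)):
--         current_sum += traffic[i] - traffic[i - window_size]
--
--         if current_sum > max_sum:
--             max_sum = current_sum
--             start_index = i - window_size + 1
--
--     return max_sum, start_index
-- ===== SOURCE B (Python) =====
-- def peak_traffic_window(traffic, window_size):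
--     n = len(traffic)
--     pre = [0]
--     total = 0
--     for x in traffic:
--         total += x
--         pre.append(total)
--     if window_size >= n:
--         return total, 0
--     best = pre[window_size]
--     best_start = 0
--     for s in range(1, n - window_size + 1):
--         cur = pre[s + window_size] - pre[s]
--         if cur > best:
--             best = cur
--             best_start = s
--     return best, best_start
-- ===== Notes on version B (the rewrite author's own statement) =====
-- stated objective: alternative
-- what changed: Replaces A's sliding-window running sum with a prefix-sum array: each candidate window sum is computed as pre[s+w]-pre[s], scanning start indices and keeping the earliest strict maximum.
import Mathlib
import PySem

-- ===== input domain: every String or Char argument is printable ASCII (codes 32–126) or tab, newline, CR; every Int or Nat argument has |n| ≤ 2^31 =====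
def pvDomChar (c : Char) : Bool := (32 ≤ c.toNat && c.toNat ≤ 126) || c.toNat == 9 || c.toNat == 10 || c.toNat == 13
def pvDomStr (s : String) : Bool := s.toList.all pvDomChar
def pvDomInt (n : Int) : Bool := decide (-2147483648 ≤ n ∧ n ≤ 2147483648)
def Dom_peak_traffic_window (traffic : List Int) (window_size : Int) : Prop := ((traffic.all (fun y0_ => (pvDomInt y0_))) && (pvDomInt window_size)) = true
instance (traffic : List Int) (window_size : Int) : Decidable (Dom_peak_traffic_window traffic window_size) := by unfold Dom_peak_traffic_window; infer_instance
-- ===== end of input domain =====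

-- B replaces A's sliding running sum with a prefix-sum array (window sum = pre[s+w]-pre[s]); alternative decomposition, same O(n) cost.


-- ===== PORT A =====
-- loop body of A: current_sum += traffic[i] - traffic[i - window_size]; track max on strict '>'
def pvStepA (traffic : List Int) (window_size : Int) (st : Int × Int × Int) (i : Int) : Int × Int × Int :=
  let cs := st.1 + ((PySem.List.pyGet? traffic i).getD 0 - (PySem.List.pyGet? traffic (i - window_size)).getD 0)
  if cs > st.2.1 then (cs, cs, i - window_size + 1) else (cs, st.2.1, st.2.2)

def peak_traffic_window (traffic : List Int) (window_size : Int) : Int × Int :=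
  let init : Int := (PySem.List.slice traffic none (some window_size)).sum
  let r := (PySem.List.pyRange window_size (traffic.length : Int) 1).foldl (pvStepA traffic window_size) (init, init, 0)
  (r.2.1, r.2.2)

-- ===== PORT B =====
-- loop body of B: cur = pre[s + window_size] - pre[s]; track max on strict '>'
def pvStepB (pre : List Int) (window_size : Int) (st : Int × Int) (s : Int) : Int × Int :=
  let cur := (PySem.List.pyGet? pre (s + window_size)).getD 0 - (PySem.List.pyGet? pre s).getD 0
  if cur > st.1 then (cur, s) else st

def peak_traffic_window_alt (traffic : List Int) (window_size : Int) : Int × Int :=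
  let n : Int := traffic.length
  let pt := traffic.foldl (fun (st : List Int × Int) x => (st.1 ++ [st.2 + x], st.2 + x)) ([0], 0)
  if window_size ≥ n then (pt.2, 0)
  else
    (PySem.List.pyRange 1 (n - window_size + 1) 1).foldl (pvStepB pt.1 window_size)
      ((PySem.List.pyGet? pt.1 window_size).getD 0, 0)

-- ===== PRECONDITION & SPEC =====
-- A raises IndexError for every negative window_size (traffic[i - window_size] runs past the end,
-- or traffic[i] on an empty list); Pre_ excludes exactly those inputs.
def Pre_peak_traffic_window (traffic : List Int) (window_size : Int) : Prop := 0 ≤ window_size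
instance (traffic : List Int) (window_size : Int) : Decidable (Pre_peak_traffic_window traffic window_size) := by unfold Pre_peak_traffic_window; infer_instance
def pvWitness_peak_traffic_window : List Int × Int := ([1, 5, 2, 3], 2)

def Spec_peak_traffic_window (traffic : List Int) (window_size : Int) (out : Int × Int) : Prop := out = peak_traffic_window_alt traffic window_size
instance (traffic : List Int) (window_size : Int) (out : Int × Int) : Decidable (Spec_peak_traffic_window traffic window_size out) := by unfold Spec_peak_traffic_window; infer_instance

-- ===== CLAIM (what is proved, stated in full; the proofs are below) =====
def Claim_equal_peak_traffic_window : Prop := ∀ (traffic : List Int) (window_size : Int), Dom_peak_traffic_window traffic window_size → Pre_peak_traffic_window traffic window_size → Spec_peak_traffic_window traffic window_size (peak_traffic_window traffic window_size)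

-- ===== LEMMAS AND PROOFS =====

-- prefix sums: the list B builds
def pvPre (l : List Int) : List Int := 0 :: (List.range l.length).map (fun k => (l.take (k + 1)).sum)

lemma pvPre_fold (l : List Int) : ∀ (acc : List Int) (t : Int),
    l.foldl (fun (st : List Int × Int) x => (st.1 ++ [st.2 + x], st.2 + x)) (acc, t)
      = (acc ++ (List.range l.length).map (fun k => t + (l.take (k + 1)).sum), t + l.sum) := by
  induction l with
  | nil => intro acc t; simp
  | cons x xs ih =>
    intro acc t
    simp only [List.foldl_cons, ih]
    rw [Prod.mk.injEq]
    refine ⟨?_, by simp; ring⟩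
    rw [List.length_cons, List.range_succ_eq_map, List.map_cons, List.map_map, List.append_assoc]
    congr 1
    simp only [List.take_succ_cons, List.sum_cons, List.singleton_append]
    congr 1
    · simp
    · apply List.map_congr_left; intro k _; simp [Function.comp]; ring

lemma pvPre_get (l : List Int) (j : Int) (h0 : 0 ≤ j) (h1 : j ≤ (l.length : Int)) :
    (PySem.List.pyGet? (pvPre l) j).getD 0 = (l.take j.toNat).sum := by
  rw [PySem.List.pyGet?_of_nonneg _ h0]
  rcases Nat.eq_zero_or_eq_succ_pred j.toNat with h | h
  · simp [pvPre, h]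
  · rw [h]
    have hk : j.toNat - 1 < l.length := by omega
    simp [pvPre, hk]

-- window sum of width w starting at s
def pvWin (l : List Int) (w s : Int) : Int := (l.take (s + w).toNat).sum - (l.take s.toNat).sum

-- one step of A advances the running sum to the next window sum
lemma pvWin_step (l : List Int) (w i : Int) (hw : 0 ≤ w) (hwi : w ≤ i) (hi : i < (l.length : Int)) :
    pvWin l w (i - w) + ((l[i.toNat]'(by omega)) - (l[(i - w).toNat]'(by omega)))
      = pvWin l w (i - w + 1) := by
  unfold pvWin
  have h1 : (i - w + w).toNat = i.toNat := by omega
  have h2 : (i - w + 1 + w).toNat = i.toNat + 1 := by omega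
  have h3 : (i - w + 1).toNat = (i - w).toNat + 1 := by omega
  rw [h1, h2, h3, List.sum_take_succ l i.toNat (by omega), List.sum_take_succ l ((i - w).toNat) (by omega)]
  ring

-- main induction: A's fold from index i equals B's fold from start i-w+1
lemma pvMain (l : List Int) (w : Int) (hw : 0 ≤ w) :
    ∀ (c : Nat) (i m si : Int), w ≤ i → i ≤ (l.length : Int) → c = ((l.length : Int) - i).toNat →
    ((PySem.List.pyRange i (l.length : Int) 1).foldl (pvStepA l w) (pvWin l w (i - w), m, si)).2
      = (PySem.List.pyRange (i - w + 1) ((l.length : Int) - w + 1) 1).foldl (pvStepB (pvPre l) w) (m, si) := by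
  intro c
  induction c with
  | zero =>
    intro i m si hwi hi hc
    have hin : (l.length : Int) ≤ i := by omega
    rw [PySem.List.pyRange_one_eq_nil hin,
        PySem.List.pyRange_one_eq_nil (show (l.length : Int) - w + 1 ≤ i - w + 1 by omega)]
    rfl
  | succ c ih =>
    intro i m si hwi hi hc
    have hlt : i < (l.length : Int) := by omega
    rw [PySem.List.pyRange_one_cons hlt,
        PySem.List.pyRange_one_cons (show i - w + 1 < (l.length : Int) - w + 1 by omega),
        List.foldl_cons, List.foldl_cons]
    have hgi : (PySem.List.pyGet? l i).getD 0 = l[i.toNat]'(by omega) := by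
      rw [PySem.List.pyGet?_eq_some_getElem _ (by omega) hlt]; rfl
    have hgiw : (PySem.List.pyGet? l (i - w)).getD 0 = l[(i - w).toNat]'(by omega) := by
      rw [PySem.List.pyGet?_eq_some_getElem _ (by omega) (by omega)]; rfl
    have hcs : pvWin l w (i - w) + ((PySem.List.pyGet? l i).getD 0 - (PySem.List.pyGet? l (i - w)).getD 0)
        = pvWin l w (i - w + 1) := by
      rw [hgi, hgiw]; exact pvWin_step l w i hw hwi hlt
    have hcur : (PySem.List.pyGet? (pvPre l) ((i - w + 1) + w)).getD 0 - (PySem.List.pyGet? (pvPre l) (i - w + 1)).getD 0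
        = pvWin l w (i - w + 1) := by
      rw [pvPre_get l _ (by omega) (by omega), pvPre_get l _ (by omega) (by omega)]
      rfl
    have hA : pvStepA l w (pvWin l w (i - w), m, si) i
        = (pvWin l w (i - w + 1),
            if pvWin l w (i - w + 1) > m then (pvWin l w (i - w + 1), i - w + 1) else (m, si)) := by
      show (if pvWin l w (i - w) + ((PySem.List.pyGet? l i).getD 0 - (PySem.List.pyGet? l (i - w)).getD 0) > m
            then _ else _) = _
      rw [hcs]
      split_ifs <;> rfl
    have hB : pvStepB (pvPre l) w (m, si) (i - w + 1)
        = (if pvWin l w (i - w + 1) > m then (pvWin l w (i - w + 1), i - w + 1) else (m, si)) := by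
      show (if (PySem.List.pyGet? (pvPre l) ((i - w + 1) + w)).getD 0 - (PySem.List.pyGet? (pvPre l) (i - w + 1)).getD 0 > m
            then _ else _) = _
      rw [hcur]
    rw [hA, hB]
    have he : i - w + 1 = (i + 1) - w := by ring
    split_ifs with hgt
    · have := ih (i + 1) (pvWin l w (i - w + 1)) (i - w + 1) (by omega) (by omega) (by omega)
      rw [← he] at this
      exact this
    · have := ih (i + 1) m si (by omega) (by omega) (by omega)
      rw [← he] at this
      exact this

-- ===== VERDICT (by name: the statement is the Claim_ definition above) =====
theorem peak_traffic_window_spec : Claim_equal_peak_traffic_window := by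
  intro l w _ hw
  unfold Spec_peak_traffic_window peak_traffic_window peak_traffic_window_alt
  have hpre : l.foldl (fun (st : List Int × Int) x => (st.1 ++ [st.2 + x], st.2 + x)) ([0], 0) = (pvPre l, l.sum) := by
    rw [pvPre_fold l [0] 0]
    simp [pvPre]
  rw [hpre]
  by_cases hge : w ≥ (l.length : Int)
  · rw [if_pos hge, PySem.List.pyRange_one_eq_nil (by omega), PySem.List.slice_to _ hw,
        List.take_of_length_le (by omega)]
    rfl
  · rw [if_neg hge, PySem.List.slice_to _ hw]
    have hww : w - w = 0 := by ring
    have hwin : (l.take w.toNat).sum = pvWin l w (w - w) := by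
      unfold pvWin
      rw [hww]
      simp
    have hinit : (PySem.List.pyGet? (pvPre l) w).getD 0 = (l.take w.toNat).sum :=
      pvPre_get l w hw (by omega)
    rw [hinit, hwin]
    have hmain := pvMain l w hw (((l.length : Int) - w).toNat) w (pvWin l w (w - w)) 0 (le_refl w) (by omega) rfl
    rw [show w - w + 1 = 1 by ring] at hmain
    rw [← hmain]
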